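-- pv_equiv track=rewrite | github.com/tchjhnsn/reflect | api/events_api/auth_views.py | _select_labeled_nodes
-- ===== SOURCE A (Python) =====
-- def _node_label_priority(node, degree):
--     kind = node.get("kind") or "default"
--     if kind == "UserProfile":
--         return 1000
--     if kind == "Conversation":
--         return 900 + degree
--     if kind in {"Person", "ContextNode", "ActionNode", "TemporalNode", "Pattern", "Cluster", "Insight"}:
--         return 700 + degree
--     if kind == "Topic":
--         return 500 + degree
--     if kind in {"UserTurn", "AssistantTurn"}:
--         return 250 + degree
--     return 100 + degree
--
-- def _select_labeled_nodes(nodes, edges):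
--     degree = {node["uid"]: 0 for node in nodes}
--     for edge in edges:
--         if edge.get("source") in degree:
--             degree[edge["source"]] += 1
--         if edge.get("target") in degree:
--             degree[edge["target"]] += 1
--
--     by_kind = {}
--     for node in nodes:
--         by_kind.setdefault(node.get("kind") or "default", []).append(node)
--
--     labeled = set()
--     always_label = {"UserProfile", "Conversation", "Person", "ContextNode", "ActionNode", "TemporalNode"}
--     caps = {
--         "Conversation": 18,
--         "Topic": 28,
--         "UserTurn": 6,
--         "AssistantTurn": 6,
--         "Signal": 0,
--         "PipelineTrace": 0,
--         "DataSource": 3,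
--         "Pattern": 8,
--         "Cluster": 8,
--         "Insight": 8,
--         "Emotion": 10,
--     }
--
--     for kind, group in by_kind.items():
--         ranked = sorted(
--             group,
--             key=lambda node: (
--                 -_node_label_priority(node, degree.get(node["uid"], 0)),
--                 str(node.get("label") or ""),
--             ),
--         )
--         limit = caps.get(kind, len(group) if kind in always_label else 5)
--         if kind in always_label:
--             limit = max(limit, min(len(group), 10))
--         for node in ranked[:limit]:
--             labeled.add(node["uid"])
--
--     return labeled, degree
-- ===== SOURCE B (Python) =====
-- def _node_label_priority(node, degree):
--     kind = node.get("kind") or "default"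
--     if kind == "UserProfile":
--         return 1000
--     if kind == "Conversation":
--         return 900 + degree
--     if kind in {"Person", "ContextNode", "ActionNode", "TemporalNode", "Pattern", "Cluster", "Insight"}:
--         return 700 + degree
--     if kind == "Topic":
--         return 500 + degree
--     if kind in {"UserTurn", "AssistantTurn"}:
--         return 250 + degree
--     return 100 + degree
--
-- _CAPS = {
--     "Conversation": 18,
--     "Topic": 28,
--     "UserTurn": 6,
--     "AssistantTurn": 6,
--     "Signal": 0,
--     "PipelineTrace": 0,
--     "DataSource": 3,
--     "Pattern": 8,
--     "Cluster": 8,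
--     "Insight": 8,
--     "Emotion": 10,
-- }
-- _ALWAYS = {"UserProfile", "Conversation", "Person", "ContextNode", "ActionNode", "TemporalNode"}
--
-- def _kind_limit(kind, count):
--     limit = _CAPS.get(kind, count if kind in _ALWAYS else 5)
--     if kind in _ALWAYS:
--         limit = max(limit, min(count, 10))
--     return limit
--
-- def _select_labeled_nodes(nodes, edges):
--     # degree: count edge endpoints once, then read the totals off per node
--     cnt = {}
--     for edge in edges:
--         for field in ("source", "target"):
--             v = edge.get(field)
--             cnt[v] = cnt.get(v, 0) + 1
--     degree = {node["uid"]: cnt.get(node["uid"], 0) for node in nodes}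
--
--     # per-kind first-seen order and sizes in one pass; resolve each kind's quota up front
--     kind_ix = {}
--     counts = {}
--     for node in nodes:
--         kind = node.get("kind") or "default"
--         if kind not in kind_ix:
--             kind_ix[kind] = len(kind_ix)
--         counts[kind] = counts.get(kind, 0) + 1
--     limits = {kind: _kind_limit(kind, count) for kind, count in counts.items()}
--
--     # one global ranking pass (stable), then a kind-grouping pass
--     order = sorted(nodes, key=lambda node: (
--         -_node_label_priority(node, degree[node["uid"]]),
--         str(node.get("label") or ""),
--     ))
--     order = sorted(order, key=lambda node: kind_ix[node.get("kind") or "default"])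
--
--     # single walk: take nodes while their kind's quota lasts
--     labeled = set()
--     taken = {}
--     for node in order:
--         kind = node.get("kind") or "default"
--         seen = taken.get(kind, 0)
--         if seen < limits[kind]:
--             labeled.add(node["uid"])
--         taken[kind] = seen + 1
--     return labeled, degree
-- ===== Notes on version B (the rewrite author's own statement) =====
-- stated objective: alternative
-- what changed: B replaces A's membership-guarded per-edge degree loop by one endpoint counter read off per node, resolves every kind's label quota up front from per-kind counts, and replaces A's per-kind grouping dict with per-group sort and slice by two global stable sort passes (rank key, then first-seen kind index) followed by a single quota-counting walk over the one sorted list.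
-- outside the precondition, e.g. on _select_labeled_nodes([{'uid': None}], []): A returns ({None}, {None: 0}), B returns ({None}, {None: 0})
import Mathlib
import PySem

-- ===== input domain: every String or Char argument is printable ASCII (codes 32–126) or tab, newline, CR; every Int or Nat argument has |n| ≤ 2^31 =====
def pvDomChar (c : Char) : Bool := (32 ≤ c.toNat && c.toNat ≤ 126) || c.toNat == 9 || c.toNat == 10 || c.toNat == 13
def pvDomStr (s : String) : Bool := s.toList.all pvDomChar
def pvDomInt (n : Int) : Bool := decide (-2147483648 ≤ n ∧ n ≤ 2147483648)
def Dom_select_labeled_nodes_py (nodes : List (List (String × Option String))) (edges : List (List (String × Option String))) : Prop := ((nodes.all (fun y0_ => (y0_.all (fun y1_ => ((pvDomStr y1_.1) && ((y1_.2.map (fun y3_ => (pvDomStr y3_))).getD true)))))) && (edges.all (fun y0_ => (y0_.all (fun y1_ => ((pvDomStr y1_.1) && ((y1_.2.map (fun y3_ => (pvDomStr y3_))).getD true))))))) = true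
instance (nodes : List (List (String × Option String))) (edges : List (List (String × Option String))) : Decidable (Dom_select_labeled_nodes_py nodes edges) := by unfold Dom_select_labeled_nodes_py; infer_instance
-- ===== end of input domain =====

-- B replaces A's per-edge membership-guarded degree loop by one endpoint counter, resolves each kind's
-- label quota up front from per-kind counts, and replaces A's per-kind grouping dict + per-group sort +
-- slice by two global stable sort passes followed by a single quota-counting walk (objective: alternative).

-- ===== PORT A =====
-- shared dict-access idioms and the same-module helper _node_label_priority, used verbatim by both Pythons
def pvGet (n : List (String × Option String)) (k : String) : Option String :=
  (PySem.Dict.mk n).getD k none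

def pvKind (n : List (String × Option String)) : String :=
  match pvGet n "kind" with
  | some s => if s = "" then "default" else s    -- node.get("kind") or "default" ('' and None are falsy)
  | none => "default"

def pvLabel (n : List (String × Option String)) : String :=
  (pvGet n "label").getD ""                      -- str(node.get("label") or "")

def pvUid (n : List (String × Option String)) : String :=
  (pvGet n "uid").getD ""                        -- node["uid"]; Pre_ guarantees a present, non-None uid

def pvAlways : PySem.Set String :=
  PySem.Set.ofList ["UserProfile", "Conversation", "Person", "ContextNode", "ActionNode", "TemporalNode"]

def pvCaps : PySem.Dict String Int :=
  PySem.Dict.mk [("Conversation", 18), ("Topic", 28), ("UserTurn", 6), ("AssistantTurn", 6),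
    ("Signal", 0), ("PipelineTrace", 0), ("DataSource", 3), ("Pattern", 8), ("Cluster", 8),
    ("Insight", 8), ("Emotion", 10)]

def pvPriority (n : List (String × Option String)) (deg : Int) : Int :=
  let kind := pvKind n
  if kind = "UserProfile" then 1000
  else if kind = "Conversation" then 900 + deg
  else if PySem.Set.contains (PySem.Set.ofList ["Person", "ContextNode", "ActionNode", "TemporalNode", "Pattern", "Cluster", "Insight"]) kind then 700 + deg
  else if kind = "Topic" then 500 + deg
  else if PySem.Set.contains (PySem.Set.ofList ["UserTurn", "AssistantTurn"]) kind then 250 + deg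
  else 100 + deg

def select_labeled_nodes_py (nodes : List (List (String × Option String))) (edges : List (List (String × Option String))) : List String × (List (String × Int)) :=
  let degree0 : PySem.Dict String Int := nodes.foldl (fun d n => d.insert (pvUid n) 0) PySem.Dict.empty
  -- a None endpoint value is never in degree under Pre_ (no None uid), so the none branch skips, as Python does
  let degree : PySem.Dict String Int := edges.foldl (fun d e =>
      let d1 := match pvGet e "source" with
        | some s => if d.contains s then d.modify s 0 (· + 1) else d
        | none => d
      match pvGet e "target" with
        | some s => if d1.contains s then d1.modify s 0 (· + 1) else d1
        | none => d1) degree0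
  let by_kind : PySem.Dict String (List (List (String × Option String))) :=
    nodes.foldl (fun d n => d.modify (pvKind n) [] (· ++ [n])) PySem.Dict.empty
  let labeled : PySem.Set String := by_kind.items.foldl (fun s kg =>
      let ranked := PySem.List.sorted2 kg.2 (fun n => -(pvPriority n (degree.getD (pvUid n) 0))) (fun n => pvLabel n) false
      let limit0 : Int := pvCaps.getD kg.1 (if pvAlways.contains kg.1 then PySem.List.len kg.2 else 5)
      let limit : Int := if pvAlways.contains kg.1 then max limit0 (min (PySem.List.len kg.2) 10) else limit0
      (PySem.List.slice ranked none (some limit)).foldl (fun s n => PySem.Set.add s (pvUid n)) s)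
    PySem.Set.empty
  (labeled, degree.items)

-- ===== PORT B =====
def pvKindLimit (kind : String) (count : Int) : Int :=
  let limit : Int := pvCaps.getD kind (if pvAlways.contains kind then count else 5)
  if pvAlways.contains kind then max limit (min count 10) else limit

def select_labeled_nodes_py_alt (nodes : List (List (String × Option String))) (edges : List (List (String × Option String))) : List String × (List (String × Int)) :=
  let cnt : PySem.Dict (Option String) Int :=
    edges.foldl (fun d e => ["source", "target"].foldl (fun d f =>
      let v := pvGet e f; d.insert v (d.getD v 0 + 1)) d) PySem.Dict.empty
  let degree : PySem.Dict String Int :=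
    nodes.foldl (fun d n => d.insert (pvUid n) (cnt.getD (some (pvUid n)) 0)) PySem.Dict.empty
  let ixct : PySem.Dict String Int × PySem.Dict String Int :=
    nodes.foldl (fun p n =>
      ((if p.1.contains (pvKind n) then p.1 else p.1.insert (pvKind n) (PySem.Dict.size p.1)),
       p.2.insert (pvKind n) (p.2.getD (pvKind n) 0 + 1))) (PySem.Dict.empty, PySem.Dict.empty)
  let limits : PySem.Dict String Int :=
    ixct.2.items.foldl (fun d kc => d.insert kc.1 (pvKindLimit kc.1 kc.2)) PySem.Dict.empty
  let order1 := PySem.List.sorted2 nodes (fun n => -(pvPriority n ((degree.get? (pvUid n)).getD 0))) (fun n => pvLabel n) false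
  let order2 := PySem.List.sorted order1 (fun n => ((ixct.1.get? (pvKind n)).getD 0 : Int)) false
  let res := order2.foldl (fun st n =>
      let seen := st.2.getD (pvKind n) 0
      ((if seen < (limits.get? (pvKind n)).getD 0 then PySem.Set.add st.1 (pvUid n) else st.1),
       st.2.insert (pvKind n) (seen + 1)))
    ((PySem.Set.empty : PySem.Set String), (PySem.Dict.empty : PySem.Dict String Int))
  (res.1, degree.items)

-- ===== PRECONDITION & SPEC =====
-- Pre_ excludes nodes without a string "uid" value: on a missing "uid" key A raises KeyError, and on a
-- None "uid" value A returns a degree dict with a None key, which is not a value of the declared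
-- List (String × Int) type.
def Pre_select_labeled_nodes_py (nodes : List (List (String × Option String))) (edges : List (List (String × Option String))) : Prop :=
  nodes.all (fun n => (pvGet n "uid").isSome) = true
instance (nodes : List (List (String × Option String))) (edges : List (List (String × Option String))) : Decidable (Pre_select_labeled_nodes_py nodes edges) := by unfold Pre_select_labeled_nodes_py; infer_instance

def pvWitness_select_labeled_nodes_py : (List (List (String × Option String))) × (List (List (String × Option String))) :=
  ([[("uid", some "a"), ("kind", some "Topic")], [("uid", some "b")]], [[("source", some "a"), ("target", some "b")]])

def Spec_select_labeled_nodes_py (nodes : List (List (String × Option String))) (edges : List (List (String × Option String))) (out : List String × (List (String × Int))) : Prop := out = select_labeled_nodes_py_alt nodes edges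
instance (nodes : List (List (String × Option String))) (edges : List (List (String × Option String))) (out : List String × (List (String × Int))) : Decidable (Spec_select_labeled_nodes_py nodes edges out) := by unfold Spec_select_labeled_nodes_py; infer_instance

-- ===== CLAIM (what is proved, stated in full; the proofs are below) =====
def Claim_equal_select_labeled_nodes_py : Prop := ∀ (nodes : List (List (String × Option String))) (edges : List (List (String × Option String))), Dom_select_labeled_nodes_py nodes edges → Pre_select_labeled_nodes_py nodes edges → Spec_select_labeled_nodes_py nodes edges (select_labeled_nodes_py nodes edges)

-- ===== LEMMAS AND PROOFS =====

-- ---------- generic insertion-sort machinery ----------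

theorem pv_insertBy_append_not {α : Type} (before : α → α → Bool) (x : α) (A B : List α)
    (h : ∀ a ∈ A, before x a = false) :
    PySem.List.insertBy before x (A ++ B) = A ++ PySem.List.insertBy before x B := by
  induction A with
  | nil => simp
  | cons a A ih =>
    simp only [List.cons_append, PySem.List.insertBy, h a (by simp)]
    simp only [Bool.false_eq_true, if_false, List.cons.injEq, true_and]
    exact ih (fun a ha => h a (by simp [ha]))

theorem pv_insertBy_all_before {α : Type} (before : α → α → Bool) (x : α) (B : List α)
    (h : ∀ b ∈ B, before x b = true) :
    PySem.List.insertBy before x B = x :: B := by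
  cases B with
  | nil => rfl
  | cons b bs => simp [PySem.List.insertBy, h b (by simp)]

theorem pv_pairwise_insertBy {α : Type} (before : α → α → Bool)
    (Hasym : ∀ x y, before x y = true → before y x = false)
    (H : ∀ x y z, before x y = true → before z y = false → before x z = true)
    (x : α) (l : List α) (hl : l.Pairwise (fun a b => before b a = false)) :
    (PySem.List.insertBy before x l).Pairwise (fun a b => before b a = false) := by
  induction l with
  | nil => simp [PySem.List.insertBy]
  | cons b bs ih =>
    rcases List.pairwise_cons.mp hl with ⟨hb, hbs⟩
    by_cases hxb : before x b = true
    · simp only [PySem.List.insertBy, hxb, if_true]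
      refine List.pairwise_cons.mpr ⟨?_, hl⟩
      intro y hy
      rcases List.mem_cons.mp hy with rfl | hy
      · exact Hasym _ _ hxb
      · by_contra hyx
        have hyx' : before y x = true := by
          cases hb2 : before y x <;> simp_all
        have := H y x b hyx' (Hasym _ _ hxb)
        rw [hb y hy] at this; exact Bool.false_ne_true this
    · simp only [PySem.List.insertBy, hxb, if_false]
      refine List.pairwise_cons.mpr ⟨?_, ih hbs⟩
      intro y hy
      simp only [PySem.List.mem_insertBy] at hy
      rcases hy with rfl | hy
      · simpa using hxb
      · exact hb y hy

theorem pv_pairwise_foldl_insertBy {α : Type} (before : α → α → Bool)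
    (Hasym : ∀ x y, before x y = true → before y x = false)
    (H : ∀ x y z, before x y = true → before z y = false → before x z = true)
    (xs : List α) :
    ∀ (acc : List α), acc.Pairwise (fun a b => before b a = false) →
      (xs.foldl (fun acc x => PySem.List.insertBy before x acc) acc).Pairwise
        (fun a b => before b a = false) := by
  induction xs with
  | nil => intro acc hacc; simpa using hacc
  | cons x xs ih =>
    intro acc hacc
    exact ih _ (pv_pairwise_insertBy before Hasym H x acc hacc)

theorem pv_filter_insertBy {α : Type} (before : α → α → Bool)
    (H : ∀ x y z, before x y = true → before z y = false → before x z = true)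
    (p : α → Bool) (x : α) (l : List α) (hl : l.Pairwise (fun a b => before b a = false)) :
    (PySem.List.insertBy before x l).filter p =
      if p x then PySem.List.insertBy before x (l.filter p) else l.filter p := by
  induction l with
  | nil => cases hpx : p x <;> simp [PySem.List.insertBy, hpx]
  | cons b bs ih =>
    rcases List.pairwise_cons.mp hl with ⟨hb, hbs⟩
    by_cases hxb : before x b = true
    · simp only [PySem.List.insertBy, hxb, if_true]
      cases hpx : p x with
      | false => simp [List.filter, hpx]
      | true =>
        cases hpb : p b with
        | true => simp [List.filter, hpx, hpb, PySem.List.insertBy, hxb]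
        | false =>
          have hall : ∀ y ∈ bs.filter p, before x y = true := by
            intro y hy
            exact H x b y hxb (hb y (List.mem_of_mem_filter hy))
          simp [List.filter, hpx, hpb, pv_insertBy_all_before before x _ hall]
    · simp only [PySem.List.insertBy, hxb, if_false]
      cases hpx : p x with
      | false =>
        cases hpb : p b <;> simp [List.filter, hpx, hpb, ih hbs]
      | true =>
        cases hpb : p b with
        | true =>
          simp [List.filter, hpx, hpb, ih hbs, PySem.List.insertBy, hxb]
        | false =>
          simp [List.filter, hpx, hpb, ih hbs]

theorem pv_filter_foldl_insertBy {α : Type} (before : α → α → Bool)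
    (Hasym : ∀ x y, before x y = true → before y x = false)
    (H : ∀ x y z, before x y = true → before z y = false → before x z = true)
    (p : α → Bool) (xs : List α) :
    (xs.foldl (fun acc x => PySem.List.insertBy before x acc) []).filter p =
      (xs.filter p).foldl (fun acc x => PySem.List.insertBy before x acc) [] := by
  induction xs using List.reverseRecOn with
  | nil => simp
  | append_singleton xs x ih =>
    rw [List.foldl_append, List.filter_append]
    simp only [List.foldl_cons, List.foldl_nil]
    rw [pv_filter_insertBy before H p x _
      (pv_pairwise_foldl_insertBy before Hasym H xs [] (by simp))]
    cases hpx : p x with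
    | false =>
      simp only [List.filter_cons, hpx, Bool.false_eq_true, if_false, List.filter_nil,
        List.append_nil]
      exact ih
    | true =>
      rw [List.foldl_append, ih]
      simp [List.filter, hpx]

-- ---------- the two comparison functions used by the sort passes ----------

def pvBefore2 {α : Type} (K1 : α → Int) (K2 : α → String) : α → α → Bool :=
  fun a b => decide (K1 a < K1 b) || (!decide (K1 b < K1 a) && decide (K2 a < K2 b))

def pvBefore1 {α : Type} (g : α → Int) : α → α → Bool := fun a b => decide (g a < g b)

theorem pv_sorted2_eq_foldl {α : Type} (xs : List α) (k1 : α → Int) (k2 : α → String) :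
    PySem.List.sorted2 xs k1 k2 false =
      xs.foldl (fun acc x => PySem.List.insertBy (pvBefore2 k1 k2) x acc) [] := rfl

theorem pv_sorted_eq_foldl' {α : Type} (xs : List α) (g : α → Int) :
    PySem.List.sorted xs g false =
      xs.foldl (fun acc x => PySem.List.insertBy (pvBefore1 g) x acc) [] := rfl

theorem pv_before2_iff {α : Type} (K1 : α → Int) (K2 : α → String) (x y : α) :
    pvBefore2 K1 K2 x y = true ↔ (K1 x < K1 y ∨ (¬ K1 y < K1 x ∧ K2 x < K2 y)) := by
  simp [pvBefore2]

theorem pv_before2_false_iff {α : Type} (K1 : α → Int) (K2 : α → String) (x y : α) :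
    pvBefore2 K1 K2 x y = false ↔ ¬ (K1 x < K1 y ∨ (¬ K1 y < K1 x ∧ K2 x < K2 y)) := by
  rw [Bool.eq_false_iff]
  exact not_congr (pv_before2_iff K1 K2 x y)

theorem pv_before2_asym {α : Type} (K1 : α → Int) (K2 : α → String) :
    ∀ x y, pvBefore2 K1 K2 x y = true → pvBefore2 K1 K2 y x = false := by
  intro x y h
  rw [pv_before2_iff] at h
  rw [pv_before2_false_iff]
  rcases h with h | ⟨h1, h2⟩
  · rintro (h' | ⟨h1', h2'⟩)
    · exact absurd h (lt_asymm h')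
    · exact h1' h
  · rintro (h' | ⟨h1', h2'⟩)
    · exact h1 h'
    · exact absurd h2 (lt_asymm h2')

theorem pv_before2_trans {α : Type} (K1 : α → Int) (K2 : α → String) :
    ∀ x y z, pvBefore2 K1 K2 x y = true → pvBefore2 K1 K2 z y = false →
      pvBefore2 K1 K2 x z = true := by
  intro x y z hxy hzy
  rw [pv_before2_iff] at hxy ⊢
  rw [pv_before2_false_iff] at hzy
  push_neg at hzy
  obtain ⟨hzy1, hzy2⟩ := hzy
  rcases hxy with h | ⟨h1, h2⟩
  · exact Or.inl (lt_of_lt_of_le h hzy1)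
  · by_cases hlt : K1 x < K1 z
    · exact Or.inl hlt
    · refine Or.inr ⟨not_lt.mpr (le_trans (not_lt.mp h1) hzy1), ?_⟩
      have hyz : K1 z ≤ K1 y := le_trans (not_lt.mp hlt) (not_lt.mp h1)
      exact lt_of_lt_of_le h2 (hzy2 hyz)

-- ---------- a stable sort on a grouping key is the concatenation of its fibers ----------

theorem pv_ins2 {α : Type} (g : α → Int) (x : α) (ys : List α) :
    ∀ (cs : List Int), cs.Pairwise (· < ·) → g x ∈ cs →
    PySem.List.insertBy (pvBefore1 g) x
        (cs.flatMap (fun c => ys.filter (fun y => decide (g y = c)))) =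
      cs.flatMap (fun c => (ys ++ [x]).filter (fun y => decide (g y = c))) := by
  intro cs
  induction cs with
  | nil => simp
  | cons c cs ih =>
    intro hp hx
    rcases List.pairwise_cons.mp hp with ⟨hc, hcs⟩
    simp only [List.flatMap_cons]
    by_cases hgx : g x = c
    · rw [pv_insertBy_append_not _ _ _ _ (by
        intro a ha
        have : g a = c := by simpa using (List.mem_filter.mp ha).2
        simp [pvBefore1, this, hgx])]
      rw [pv_insertBy_all_before _ _ _ (by
        intro b hb
        rcases List.mem_flatMap.mp hb with ⟨c', hc', hbc'⟩
        have : g b = c' := by simpa using (List.mem_filter.mp hbc').2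
        simp only [pvBefore1, decide_eq_true_eq, this, hgx]
        exact hc c' hc')]
      have h1 : (ys ++ [x]).filter (fun y => decide (g y = c)) =
          ys.filter (fun y => decide (g y = c)) ++ [x] := by
        rw [List.filter_append]; simp [hgx]
      have h2 : ∀ c' ∈ cs, (ys ++ [x]).filter (fun y => decide (g y = c')) =
          ys.filter (fun y => decide (g y = c')) := by
        intro c' hc'
        rw [List.filter_append]
        have : g x ≠ c' := by have := hc c' hc'; omega
        simp [this]
      rw [h1, List.flatMap_congr h2]
      simp
    · have hx' : g x ∈ cs := by
        cases List.mem_cons.mp hx with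
        | inl h => exact absurd h hgx
        | inr h => exact h
      rw [pv_insertBy_append_not _ _ _ _ (by
        intro a ha
        have ha' : g a = c := by simpa using (List.mem_filter.mp ha).2
        have hcx : c < g x := hc _ hx'
        simp only [pvBefore1, decide_eq_false_iff_not]
        omega)]
      rw [ih hcs hx']
      have : (ys ++ [x]).filter (fun y => decide (g y = c)) =
          ys.filter (fun y => decide (g y = c)) := by
        rw [List.filter_append]; simp [hgx]
      rw [this]

theorem pv_grp {α : Type} (g : α → Int) (ys : List α) (cs : List Int)
    (hcs : cs.Pairwise (· < ·)) (hg : ∀ y ∈ ys, g y ∈ cs) :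
    PySem.List.sorted ys g false =
      cs.flatMap (fun c => ys.filter (fun y => decide (g y = c))) := by
  rw [pv_sorted_eq_foldl']
  induction ys using List.reverseRecOn with
  | nil => simp
  | append_singleton ys x ih =>
    rw [List.foldl_append]
    simp only [List.foldl_cons, List.foldl_nil]
    rw [ih (fun y hy => hg y (by simp [hy]))]
    exact pv_ins2 g x ys cs hcs (hg x (by simp))

-- ---------- dictionary loop lemmas ----------

theorem pv_getD_foldl_insert_keyfun {β : Type} (key : β → String) (f : String → Int) :
    ∀ (l : List β) (d : PySem.Dict String Int) (u : String),
    (l.foldl (fun d n => d.insert (key n) (f (key n))) d).getD u 0 =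
      if u ∈ l.map key then f u else d.getD u 0 := by
  intro l
  induction l using List.reverseRecOn with
  | nil => simp
  | append_singleton l x ih =>
    intro d u
    rw [List.foldl_append]
    simp only [List.foldl_cons, List.foldl_nil, List.map_append, List.map_cons, List.map_nil]
    rw [PySem.Dict.getD_insert, ih]
    by_cases hu : u = key x <;> by_cases hm : u ∈ l.map key <;> simp [hu, hm]

def pvStepV (d : PySem.Dict String Int) (v : Option String) : PySem.Dict String Int :=
  match v with
  | some s => if d.contains s then d.modify s 0 (· + 1) else d
  | none => d

def pvEndpoints (edges : List (List (String × Option String))) : List (Option String) :=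
  edges.flatMap (fun e => [pvGet e "source", pvGet e "target"])

theorem pv_degA_eq (edges : List (List (String × Option String))) :
    ∀ (d : PySem.Dict String Int),
    edges.foldl (fun d e =>
      let d1 := match pvGet e "source" with
        | some s => if d.contains s then d.modify s 0 (· + 1) else d
        | none => d
      match pvGet e "target" with
        | some s => if d1.contains s then d1.modify s 0 (· + 1) else d1
        | none => d1) d
    = (pvEndpoints edges).foldl pvStepV d := by
  induction edges with
  | nil => intro d; rfl
  | cons e es ih =>
    intro d
    simp only [pvEndpoints, List.flatMap_cons, List.foldl_cons, List.cons_append,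
      List.nil_append, List.foldl_append] at *
    exact ih _

theorem pv_keys_foldl_stepV : ∀ (vs : List (Option String)) (d : PySem.Dict String Int),
    (vs.foldl pvStepV d).keys = d.keys := by
  intro vs
  induction vs with
  | nil => intro d; rfl
  | cons v vs ih =>
    intro d
    rw [List.foldl_cons, ih]
    cases v with
    | none => rfl
    | some s =>
      simp only [pvStepV]
      by_cases hc : d.contains s
      · rw [if_pos hc, PySem.Dict.keys_modify, PySem.Dict.keys_insert_of_contains]
        exact hc
      · rw [if_neg hc]

theorem pv_getD_foldl_stepV : ∀ (vs : List (Option String)) (d : PySem.Dict String Int)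
    (u : String), d.contains u = true →
    (vs.foldl pvStepV d).getD u 0 = d.getD u 0 + (vs.count (some u) : Int) := by
  intro vs
  induction vs with
  | nil => intro d u _; simp
  | cons v vs ih =>
    intro d u hu
    rw [List.foldl_cons]
    cases v with
    | none =>
      rw [show pvStepV d none = d from rfl, ih d u hu, List.count_cons]
      simp
    | some s =>
      by_cases hc : d.contains s
      · have h1 : pvStepV d (some s) = d.modify s 0 (· + 1) := by simp [pvStepV, hc]
        rw [h1, ih _ u (by rw [PySem.Dict.contains_modify]; simp [hu]), PySem.Dict.getD_modify,
          List.count_cons]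
        by_cases hsu : u = s
        · subst hsu; simp only [if_pos rfl, BEq.rfl, if_true]; push_cast; ring
        · have hbe : (some s == some u) = false := by
            simp only [beq_eq_false_iff_ne, ne_eq, Option.some.injEq]
            exact fun h => hsu h.symm
          rw [if_neg hsu, hbe]
          simp
      · have h1 : pvStepV d (some s) = d := by simp [pvStepV, hc]
        have hbe : (some s == some u) = false := by
          simp only [beq_eq_false_iff_ne, ne_eq, Option.some.injEq]
          intro h; rw [h] at hc; rw [hu] at hc; exact hc rfl
        rw [h1, ih d u hu, List.count_cons, hbe]
        simp

def pvUids (nodes : List (List (String × Option String))) : PySem.Set String :=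
  PySem.Set.ofList (nodes.map pvUid)

def pvKinds (nodes : List (List (String × Option String))) : PySem.Set String :=
  PySem.Set.ofList (nodes.map pvKind)

theorem pv_items_degA (nodes edges : List (List (String × Option String))) :
    (edges.foldl (fun d e =>
      let d1 := match pvGet e "source" with
        | some s => if d.contains s then d.modify s 0 (· + 1) else d
        | none => d
      match pvGet e "target" with
        | some s => if d1.contains s then d1.modify s 0 (· + 1) else d1
        | none => d1)
      (nodes.foldl (fun d n => d.insert (pvUid n) 0)
        (PySem.Dict.empty : PySem.Dict String Int))).items
    = (pvUids nodes).map (fun u => (u, ((pvEndpoints edges).count (some u) : Int))) := by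
  rw [pv_degA_eq]
  have hkeys0 : (nodes.foldl (fun d n => d.insert (pvUid n) 0)
      (PySem.Dict.empty : PySem.Dict String Int)).keys = pvUids nodes := by
    rw [PySem.Dict.keys_foldl_insert_key nodes pvUid (fun _ _ => (0 : Int)) PySem.Dict.empty,
      PySem.Dict.keys_empty, PySem.Set.update_nil_left]
    rfl
  have hnd0 : (nodes.foldl (fun d n => d.insert (pvUid n) 0)
      (PySem.Dict.empty : PySem.Dict String Int)).keys.Nodup :=
    PySem.Dict.nodup_keys_foldl_insert_key nodes pvUid _ _ PySem.Dict.nodup_keys_empty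
  have hkeys : ((pvEndpoints edges).foldl pvStepV
      (nodes.foldl (fun d n => d.insert (pvUid n) 0)
        (PySem.Dict.empty : PySem.Dict String Int))).keys = pvUids nodes := by
    rw [pv_keys_foldl_stepV, hkeys0]
  have hnd : ((pvEndpoints edges).foldl pvStepV
      (nodes.foldl (fun d n => d.insert (pvUid n) 0)
        (PySem.Dict.empty : PySem.Dict String Int))).keys.Nodup := by
    rw [pv_keys_foldl_stepV]; exact hnd0
  rw [PySem.Dict.items_eq_map_keys _ hnd 0, hkeys]
  apply List.map_congr_left
  intro u hu
  have hc : (nodes.foldl (fun d n => d.insert (pvUid n) 0)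
      (PySem.Dict.empty : PySem.Dict String Int)).contains u = true := by
    rw [PySem.Dict.contains_eq_decide_mem_keys, hkeys0]; simpa using hu
  rw [pv_getD_foldl_stepV _ _ u hc,
    pv_getD_foldl_insert_keyfun pvUid (fun _ => (0 : Int)) nodes PySem.Dict.empty u]
  simp

theorem pv_items_degB (nodes edges : List (List (String × Option String))) :
    (nodes.foldl (fun d n => d.insert (pvUid n)
        ((edges.foldl (fun d e => ["source", "target"].foldl (fun d f =>
            let v := pvGet e f; d.insert v (d.getD v 0 + 1)) d)
          (PySem.Dict.empty : PySem.Dict (Option String) Int)).getD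
          (some (pvUid n)) 0)) (PySem.Dict.empty : PySem.Dict String Int)).items
    = (pvUids nodes).map (fun u => (u, ((pvEndpoints edges).count (some u) : Int))) := by
  have hcnt : (edges.foldl (fun d e => ["source", "target"].foldl (fun d f =>
      let v := pvGet e f; d.insert v (d.getD v 0 + 1)) d)
      (PySem.Dict.empty : PySem.Dict (Option String) Int))
      = PySem.Dict.counter (pvEndpoints edges) := by
    rw [← PySem.Dict.foldl_insert_getD_add_one_eq_counter]
    generalize (PySem.Dict.empty : PySem.Dict (Option String) Int) = d
    induction edges generalizing d with
    | nil => rfl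
    | cons e es ih =>
      simp only [pvEndpoints, List.flatMap_cons, List.foldl_cons, List.cons_append,
        List.nil_append, List.foldl_append] at *
      exact ih _
  have hkeys : (nodes.foldl (fun d n => d.insert (pvUid n)
      ((edges.foldl (fun d e => ["source", "target"].foldl (fun d f =>
          let v := pvGet e f; d.insert v (d.getD v 0 + 1)) d)
          (PySem.Dict.empty : PySem.Dict (Option String) Int)).getD
        (some (pvUid n)) 0)) (PySem.Dict.empty : PySem.Dict String Int)).keys = pvUids nodes := by
    rw [PySem.Dict.keys_foldl_insert_key nodes pvUid _ PySem.Dict.empty,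
      PySem.Dict.keys_empty, PySem.Set.update_nil_left]
    rfl
  have hnd : (nodes.foldl (fun d n => d.insert (pvUid n)
      ((edges.foldl (fun d e => ["source", "target"].foldl (fun d f =>
          let v := pvGet e f; d.insert v (d.getD v 0 + 1)) d)
          (PySem.Dict.empty : PySem.Dict (Option String) Int)).getD
        (some (pvUid n)) 0)) (PySem.Dict.empty : PySem.Dict String Int)).keys.Nodup :=
    PySem.Dict.nodup_keys_foldl_insert_key nodes pvUid _ _ PySem.Dict.nodup_keys_empty
  rw [PySem.Dict.items_eq_map_keys _ hnd 0, hkeys]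
  apply List.map_congr_left
  intro u hu
  simp only [hcnt]
  rw [pv_getD_foldl_insert_keyfun pvUid
    (fun u => (PySem.Dict.counter (pvEndpoints edges)).getD (some u) 0) nodes PySem.Dict.empty u]
  have humem : u ∈ nodes.map pvUid := by
    have := hu; simp only [pvUids] at this; exact (PySem.Set.mem_ofList _ _).mp this
  rw [if_pos humem, PySem.Dict.getD_counter]

-- ---------- by_kind grouping (A) ----------

theorem pv_by_kind_getD (nodes : List (List (String × Option String))) (k : String) :
    (nodes.foldl (fun d n => d.modify (pvKind n) [] (· ++ [n]))
      (PySem.Dict.empty : PySem.Dict String (List (List (String × Option String))))).getD k []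
    = nodes.filter (fun n => decide (pvKind n = k)) := by
  rw [show nodes.foldl (fun d n => d.modify (pvKind n) [] (· ++ [n]))
      (PySem.Dict.empty : PySem.Dict String (List (List (String × Option String))))
    = (nodes.map (fun n => (pvKind n, n))).foldl (fun d p => d.modify p.1 [] (· ++ [p.2]))
      PySem.Dict.empty from by rw [List.foldl_map]]
  rw [PySem.Dict.getD_foldl_modify_append, PySem.Dict.getD_empty, List.nil_append,
    List.filter_map, List.map_map]
  rw [show nodes.filter ((fun p => p.1 == k) ∘ fun n => (pvKind n, n))
      = nodes.filter (fun n => decide (pvKind n = k)) from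
    List.filter_congr (fun n _ => by by_cases h : pvKind n = k <;> simp [Function.comp, h])]
  simp [Function.comp_def]

theorem pv_by_kind_items (nodes : List (List (String × Option String))) :
    (nodes.foldl (fun d n => d.modify (pvKind n) [] (· ++ [n]))
      (PySem.Dict.empty : PySem.Dict String (List (List (String × Option String))))).items
    = (pvKinds nodes).map (fun k => (k, nodes.filter (fun n => decide (pvKind n = k)))) := by
  have hkeys : (nodes.foldl (fun d n => d.modify (pvKind n) [] (· ++ [n]))
      (PySem.Dict.empty : PySem.Dict String (List (List (String × Option String))))).keys
      = pvKinds nodes := by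
    rw [PySem.Dict.keys_foldl_modify_key nodes pvKind [] (fun _ n => (· ++ [n])) PySem.Dict.empty,
      PySem.Dict.keys_empty, PySem.Set.update_nil_left]
    rfl
  have hnd : (nodes.foldl (fun d n => d.modify (pvKind n) [] (· ++ [n]))
      (PySem.Dict.empty : PySem.Dict String (List (List (String × Option String))))).keys.Nodup :=
    PySem.Dict.nodup_keys_foldl_modify_key nodes pvKind [] _ _ PySem.Dict.nodup_keys_empty
  rw [PySem.Dict.items_eq_map_keys _ hnd [], hkeys]
  exact List.map_congr_left (fun k _ => by rw [pv_by_kind_getD])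

-- ---------- per-kind counts and limits (B) ----------

theorem pv_getD_foldl_insert_idfun (f : String → Int) (l : List String)
    (d : PySem.Dict String Int) (u : String) :
    (l.foldl (fun d n => d.insert n (f n)) d).getD u 0 = if u ∈ l then f u else d.getD u 0 := by
  have h := pv_getD_foldl_insert_keyfun (fun x => x) f l d u
  simpa using h

theorem pv_limits_getD (nodes : List (List (String × Option String))) (k : String)
    (hk : k ∈ pvKinds nodes) :
    (((PySem.Dict.counter (nodes.map pvKind)).items.foldl
        (fun d kc => d.insert kc.1 (pvKindLimit kc.1 kc.2))
        (PySem.Dict.empty : PySem.Dict String Int)).get? k).getD 0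
    = pvKindLimit k ((nodes.map pvKind).count k) := by
  rw [← PySem.Dict.getD_eq_get?_getD, PySem.Dict.items_counter, List.foldl_map]
  have h := pv_getD_foldl_insert_idfun
    (fun k' => pvKindLimit k' ((nodes.map pvKind).count k'))
    (PySem.Set.ofList (nodes.map pvKind)) PySem.Dict.empty k
  rw [show ((PySem.Set.ofList (nodes.map pvKind)).foldl
      (fun d x => d.insert (x, ((nodes.map pvKind).count x : Int)).1
        (pvKindLimit (x, ((nodes.map pvKind).count x : Int)).1
          (x, ((nodes.map pvKind).count x : Int)).2)) PySem.Dict.empty : PySem.Dict String Int)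
    = (PySem.Set.ofList (nodes.map pvKind)).foldl
      (fun d n => d.insert n ((fun k' => pvKindLimit k' ((nodes.map pvKind).count k')) n))
      PySem.Dict.empty from rfl]
  rw [h, if_pos (show k ∈ PySem.Set.ofList (nodes.map pvKind) from hk)]

-- ---------- first-seen kind indices (B) ----------

theorem pv_index?_getElem (s : List String) (hnd : s.Nodup) (i : Nat) (hi : i < s.length) :
    PySem.List.index? s s[i] = some i := by
  rw [PySem.List.index?_eq_some_iff]
  refine ⟨s.take i, s.drop (i + 1), ?_, ?_, ?_⟩
  · conv_lhs => rw [← List.take_append_drop i s, ← List.getElem_cons_drop hi]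
  · simp [List.length_take]; omega
  · intro hmem
    have hnd2 : (s.take i ++ s.drop i).Nodup := by rw [List.take_append_drop]; exact hnd
    rw [← List.getElem_cons_drop hi] at hnd2
    exact List.disjoint_of_nodup_append hnd2 hmem List.mem_cons_self

theorem pv_kix_get? : ∀ (ks : List String) (k : String),
    ((ks.foldl (fun d k' => if d.contains k' then d else d.insert k' (d.size : Int))
        (PySem.Dict.empty : PySem.Dict String Int)).get? k)
      = ((PySem.List.index? (PySem.Set.ofList ks) k).map (fun i => Int.ofNat i))
    ∧ (ks.foldl (fun d k' => if d.contains k' then d else d.insert k' (d.size : Int))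
        (PySem.Dict.empty : PySem.Dict String Int)).size = (PySem.Set.ofList ks).length := by
  intro ks
  induction ks using List.reverseRecOn with
  | nil => intro k; simp [PySem.Dict.get?_empty, PySem.Set.ofList]
  | append_singleton ks k0 ih =>
    intro k
    rw [List.foldl_append, List.foldl_cons, List.foldl_nil, PySem.Set.ofList_append_singleton]
    have hcont : (ks.foldl (fun d k' => if d.contains k' then d else d.insert k' (d.size : Int))
        (PySem.Dict.empty : PySem.Dict String Int)).contains k0
        = decide (k0 ∈ PySem.Set.ofList ks) := by
      rw [PySem.Dict.contains_eq_isSome_get?, (ih k0).1]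
      cases hidx : PySem.List.index? (PySem.Set.ofList ks) k0 with
      | none =>
        have hm' : k0 ∉ PySem.Set.ofList ks := (PySem.List.index?_eq_none_iff _ _).mp hidx
        simp [hm']
      | some i =>
        have hm' : k0 ∈ PySem.Set.ofList ks := by
          have hs : (PySem.List.index? (PySem.Set.ofList ks) k0).isSome = true := by
            rw [hidx]; rfl
          exact (PySem.List.index?_isSome_iff _ _).mp hs
        simp [hm']
    by_cases hm : k0 ∈ PySem.Set.ofList ks
    · rw [hcont]
      rw [if_pos (by simp [hm])]
      rw [PySem.Set.add_of_mem hm]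
      exact ih k
    · rw [hcont, if_neg (by simp [hm])]
      rw [PySem.Set.add_of_not_mem hm]
      constructor
      · by_cases hk0 : k = k0
        · subst hk0
          rw [PySem.Dict.get?_insert, if_pos rfl,
            PySem.List.index?_append_singleton_self _ _ hm, (ih k).2]
          simp
        · rw [PySem.Dict.get?_insert, if_neg hk0, (ih k).1]
          by_cases hkm : k ∈ PySem.Set.ofList ks
          · rw [PySem.List.index?_append_of_mem _ hkm]
          · rw [(PySem.List.index?_eq_none_iff _ _).mpr hkm,
              (PySem.List.index?_eq_none_iff _ _).mpr (by
                intro hmem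
                rcases List.mem_append.mp hmem with h | h
                · exact hkm h
                · exact hk0 (by simpa using h))]
      · rw [PySem.Dict.size_insert, if_neg (by rw [hcont]; simp [hm]), (ih k).2,
          List.length_append]
        simp

-- ---------- flatMap over range of a list's indices ----------

theorem pv_range_flatMap {β γ : Type} : ∀ (ks : List β) (F : Nat → List γ) (G : β → List γ),
    (∀ i (hi : i < ks.length), F i = G ks[i]) →
    (List.range ks.length).flatMap F = ks.flatMap G := by
  intro ks
  induction ks using List.reverseRecOn with
  | nil => intro F G _; simp
  | append_singleton ks b ih =>
    intro F G h
    rw [show (ks ++ [b]).length = ks.length + 1 by simp, List.range_succ,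
      List.flatMap_append, List.flatMap_append]
    simp only [List.flatMap_cons, List.flatMap_nil, List.append_nil]
    congr 1
    · refine ih F G (fun i hi => ?_)
      rw [h i (by simp; omega), List.getElem_append_left hi]
    · rw [h ks.length (by simp), List.getElem_concat_length rfl]

-- ---------- the quota-counting walk (B) ----------

theorem pv_walk_block (L : PySem.Dict String Int) (k : String) :
    ∀ (bs : List (List (String × Option String))), (∀ n ∈ bs, pvKind n = k) →
    ∀ (s : PySem.Set String) (t : PySem.Dict String Int),
    ∃ t', bs.foldl (fun st n =>
        ((if st.2.getD (pvKind n) 0 < (L.get? (pvKind n)).getD 0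
            then PySem.Set.add st.1 (pvUid n) else st.1),
         st.2.insert (pvKind n) (st.2.getD (pvKind n) 0 + 1))) (s, t)
      = ((bs.take (((L.get? k).getD 0 - t.getD k 0).toNat)).foldl
          (fun s n => PySem.Set.add s (pvUid n)) s, t')
      ∧ ∀ k', t'.getD k' 0 = t.getD k' 0 + (if k' = k then (bs.length : Int) else 0) := by
  intro bs
  induction bs with
  | nil => intro _ s t; exact ⟨t, by simp, fun k' => by simp⟩
  | cons n bs ih =>
    intro hbs s t
    have hk : pvKind n = k := hbs n List.mem_cons_self
    rw [List.foldl_cons]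
    dsimp only
    rw [hk]
    obtain ⟨t', hfold, hval⟩ := ih (fun m hm => hbs m (List.mem_cons_of_mem _ hm))
      (if t.getD k 0 < (L.get? k).getD 0 then PySem.Set.add s (pvUid n) else s)
      (t.insert k (t.getD k 0 + 1))
    refine ⟨t', ?_, ?_⟩
    · rw [hfold]
      have hgt : (t.insert k (t.getD k 0 + 1)).getD k 0 = t.getD k 0 + 1 := by
        rw [PySem.Dict.getD_insert, if_pos rfl]
      rw [hgt]
      by_cases hlt : t.getD k 0 < (L.get? k).getD 0
      · rw [if_pos hlt]
        have harith : (((L.get? k).getD 0 : Int) - t.getD k 0).toNat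
            = (((L.get? k).getD 0 : Int) - (t.getD k 0 + 1)).toNat + 1 := by omega
        rw [harith, List.take_succ_cons, List.foldl_cons]
      · rw [if_neg hlt]
        have h0 : (((L.get? k).getD 0 : Int) - t.getD k 0).toNat = 0 := by omega
        have h1 : (((L.get? k).getD 0 : Int) - (t.getD k 0 + 1)).toNat = 0 := by omega
        rw [h0, h1, List.take_zero, List.take_zero]
    · intro k'
      rw [hval k', PySem.Dict.getD_insert]
      by_cases hk' : k' = k
      · subst hk'
        rw [if_pos rfl, if_pos rfl, if_pos rfl, List.length_cons]
        push_cast; ring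
      · rw [if_neg hk', if_neg hk', if_neg hk']

theorem pv_walk_main (L : PySem.Dict String Int) :
    ∀ (ks : List String), ks.Nodup →
    ∀ (RB : String → List (List (String × Option String))),
      (∀ k ∈ ks, ∀ n ∈ RB k, pvKind n = k) →
    ∀ (s : PySem.Set String) (t : PySem.Dict String Int), (∀ k ∈ ks, t.getD k 0 = 0) →
    ((ks.flatMap RB).foldl (fun st n =>
        ((if st.2.getD (pvKind n) 0 < (L.get? (pvKind n)).getD 0
            then PySem.Set.add st.1 (pvUid n) else st.1),
         st.2.insert (pvKind n) (st.2.getD (pvKind n) 0 + 1))) (s, t)).1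
      = ks.foldl (fun s k => ((RB k).take (((L.get? k).getD 0).toNat)).foldl
          (fun s n => PySem.Set.add s (pvUid n)) s) s := by
  intro ks
  induction ks with
  | nil => intro _ _ _ s t _; simp
  | cons k ks ih =>
    intro hnd RB hRB s t ht
    obtain ⟨hknot, hnd'⟩ := List.nodup_cons.mp hnd
    rw [List.flatMap_cons, List.foldl_append, List.foldl_cons]
    obtain ⟨t', hfold, hval⟩ := pv_walk_block L k (RB k) (hRB k List.mem_cons_self) s t
    rw [hfold]
    rw [ht k List.mem_cons_self, sub_zero]
    refine ih hnd' RB (fun k' hk' => hRB k' (List.mem_cons_of_mem _ hk')) _ t' (fun k' hk' => ?_)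
    have hne : k' ≠ k := fun h => hknot (by rw [← h]; exact hk')
    rw [hval k', if_neg hne, ht k' (List.mem_cons_of_mem _ hk'), add_zero]

-- ---------- the per-kind limit is nonnegative, and counts are fiber lengths ----------

theorem pv_caps_getD_nonneg (k : String) (dflt : Int) (h : 0 ≤ dflt) :
    0 ≤ pvCaps.getD k dflt := by
  rw [PySem.Dict.getD_eq_get?_getD]
  cases hv : pvCaps.get? k with
  | none => simpa using h
  | some v =>
    have hm := PySem.Dict.mem_items_of_get?_eq_some (d := pvCaps) (k := k) (v := v) hv
    have hm' : (k, v) ∈ [("Conversation", (18:Int)), ("Topic", 28), ("UserTurn", 6),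
        ("AssistantTurn", 6), ("Signal", 0), ("PipelineTrace", 0), ("DataSource", 3),
        ("Pattern", 8), ("Cluster", 8), ("Insight", 8), ("Emotion", 10)] := hm
    simp only [List.mem_cons, Prod.mk.injEq, List.not_mem_nil, or_false] at hm'
    rcases hm' with ⟨_, rfl⟩ | ⟨_, rfl⟩ | ⟨_, rfl⟩ | ⟨_, rfl⟩ | ⟨_, rfl⟩ | ⟨_, rfl⟩ |
      ⟨_, rfl⟩ | ⟨_, rfl⟩ | ⟨_, rfl⟩ | ⟨_, rfl⟩ | ⟨_, rfl⟩ <;> norm_num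

theorem pv_kindLimit_nonneg (k : String) (c : Int) (hc : 0 ≤ c) : 0 ≤ pvKindLimit k c := by
  unfold pvKindLimit
  by_cases ha : pvAlways.contains k = true
  · simp only [if_pos ha]
    exact le_trans (le_min hc (by norm_num)) (le_max_right _ _)
  · simp only [if_neg ha]
    exact pv_caps_getD_nonneg k _ (by norm_num)

theorem pv_count_map_kind (nodes : List (List (String × Option String))) (k : String) :
    (((nodes.map pvKind).count k : Nat) : Int)
      = ((nodes.filter (fun n => decide (pvKind n = k))).length : Int) := by
  have h1 : (nodes.map pvKind).count k = (nodes.filter (fun n => decide (pvKind n = k))).length := by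
    rw [List.count_eq_countP, List.countP_map,
      show ((fun x => x == k) ∘ pvKind) = (fun n => decide (pvKind n = k)) from
        funext (fun n => by by_cases h : pvKind n = k <;> simp [Function.comp, h]),
      List.countP_eq_length_filter]
  rw [h1]

-- ---------- proof-side names for the two ports' intermediate values ----------

def pvDegA (nodes edges : List (List (String × Option String))) : PySem.Dict String Int :=
  edges.foldl (fun d e =>
      let d1 := match pvGet e "source" with
        | some s => if d.contains s then d.modify s 0 (· + 1) else d
        | none => d
      match pvGet e "target" with
        | some s => if d1.contains s then d1.modify s 0 (· + 1) else d1
        | none => d1)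
    (nodes.foldl (fun d n => d.insert (pvUid n) 0) PySem.Dict.empty)

def pvCnt (edges : List (List (String × Option String))) : PySem.Dict (Option String) Int :=
  edges.foldl (fun d e => ["source", "target"].foldl (fun d f =>
    let v := pvGet e f; d.insert v (d.getD v 0 + 1)) d) PySem.Dict.empty

def pvDegB (nodes edges : List (List (String × Option String))) : PySem.Dict String Int :=
  nodes.foldl (fun d n => d.insert (pvUid n) ((pvCnt edges).getD (some (pvUid n)) 0))
    PySem.Dict.empty

def pvIxct (nodes : List (List (String × Option String))) :
    PySem.Dict String Int × PySem.Dict String Int :=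
  nodes.foldl (fun p n =>
      ((if p.1.contains (pvKind n) then p.1 else p.1.insert (pvKind n) (PySem.Dict.size p.1)),
       p.2.insert (pvKind n) (p.2.getD (pvKind n) 0 + 1))) (PySem.Dict.empty, PySem.Dict.empty)

def pvLimits (nodes : List (List (String × Option String))) : PySem.Dict String Int :=
  (pvIxct nodes).2.items.foldl (fun d kc => d.insert kc.1 (pvKindLimit kc.1 kc.2))
    PySem.Dict.empty

def pvO1 (nodes edges : List (List (String × Option String))) :
    List (List (String × Option String)) :=
  PySem.List.sorted2 nodes (fun n => -(pvPriority n (((pvDegB nodes edges).get? (pvUid n)).getD 0)))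
    (fun n => pvLabel n) false

def pvO2 (nodes edges : List (List (String × Option String))) :
    List (List (String × Option String)) :=
  PySem.List.sorted (pvO1 nodes edges)
    (fun n => (((pvIxct nodes).1.get? (pvKind n)).getD 0 : Int)) false

def pvLabB (nodes edges : List (List (String × Option String))) : PySem.Set String :=
  ((pvO2 nodes edges).foldl (fun st n =>
      ((if st.2.getD (pvKind n) 0 < ((pvLimits nodes).get? (pvKind n)).getD 0
          then PySem.Set.add st.1 (pvUid n) else st.1),
       st.2.insert (pvKind n) (st.2.getD (pvKind n) 0 + 1)))
    ((PySem.Set.empty : PySem.Set String), (PySem.Dict.empty : PySem.Dict String Int))).1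

def pvByKind (nodes : List (List (String × Option String))) :
    PySem.Dict String (List (List (String × Option String))) :=
  nodes.foldl (fun d n => d.modify (pvKind n) [] (· ++ [n])) PySem.Dict.empty

def pvLabA (nodes edges : List (List (String × Option String))) : PySem.Set String :=
  (pvByKind nodes).items.foldl (fun s kg =>
      let ranked := PySem.List.sorted2 kg.2
        (fun n => -(pvPriority n ((pvDegA nodes edges).getD (pvUid n) 0))) (fun n => pvLabel n) false
      let limit0 : Int := pvCaps.getD kg.1 (if pvAlways.contains kg.1 then PySem.List.len kg.2 else 5)
      let limit : Int := if pvAlways.contains kg.1 then max limit0 (min (PySem.List.len kg.2) 10) else limit0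
      (PySem.List.slice ranked none (some limit)).foldl (fun s n => PySem.Set.add s (pvUid n)) s)
    PySem.Set.empty

-- ---------- the main equality ----------

theorem pv_main (nodes edges : List (List (String × Option String))) :
    (pvLabA nodes edges, (pvDegA nodes edges).items)
      = (pvLabB nodes edges, (pvDegB nodes edges).items) := by
  have hdeg : pvDegA nodes edges = pvDegB nodes edges := by
    apply PySem.Dict.ext
    unfold pvDegA pvDegB pvCnt
    rw [pv_items_degA, pv_items_degB]
  have hsplit : pvIxct nodes
      = (nodes.foldl (fun d n => if d.contains (pvKind n) then d
            else d.insert (pvKind n) ((PySem.Dict.size d : Int))) PySem.Dict.empty,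
         nodes.foldl (fun d n => d.insert (pvKind n) (d.getD (pvKind n) 0 + 1))
           PySem.Dict.empty) := by
    unfold pvIxct
    exact PySem.List.foldl_prod_mk
      (fun d (n : List (String × Option String)) =>
        if d.contains (pvKind n) then d else d.insert (pvKind n) ((PySem.Dict.size d : Int)))
      (fun d (n : List (String × Option String)) =>
        d.insert (pvKind n) (d.getD (pvKind n) (0 : Int) + 1)) nodes PySem.Dict.empty
      PySem.Dict.empty
  have hcounts : (pvIxct nodes).2 = PySem.Dict.counter (nodes.map pvKind) := by
    rw [hsplit]
    dsimp only
    rw [show nodes.foldl (fun d n => d.insert (pvKind n) (d.getD (pvKind n) 0 + 1))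
          (PySem.Dict.empty : PySem.Dict String Int)
        = (nodes.map pvKind).foldl (fun d k' => d.insert k' (d.getD k' 0 + 1))
          (PySem.Dict.empty : PySem.Dict String Int)
      from by rw [List.foldl_map]]
    exact PySem.Dict.foldl_insert_getD_add_one_eq_counter _
  have hkixf : (pvIxct nodes).1
      = (nodes.map pvKind).foldl (fun d k' => if d.contains k' then d
          else d.insert k' ((PySem.Dict.size d : Int))) PySem.Dict.empty := by
    rw [hsplit]
    dsimp only
    rw [List.foldl_map]
  have ho1 : pvO1 nodes edges = PySem.List.sorted2 nodes
      (fun n => -(pvPriority n ((pvDegA nodes edges).getD (pvUid n) 0)))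
      (fun n => pvLabel n) false := by
    unfold pvO1
    rw [← hdeg]
    rw [show (fun n => -(pvPriority n (((pvDegA nodes edges).get? (pvUid n)).getD 0)))
        = (fun n => -(pvPriority n ((pvDegA nodes edges).getD (pvUid n) 0))) from
      funext (fun n => by rw [PySem.Dict.getD_eq_get?_getD])]
  have hgfun : (fun n => ((((pvIxct nodes).1).get? (pvKind n)).getD 0 : Int))
      = (fun n => (((PySem.List.index? (pvKinds nodes) (pvKind n)).map
          (fun i => Int.ofNat i)).getD 0)) := by
    funext n
    rw [hkixf, (pv_kix_get? (nodes.map pvKind) (pvKind n)).1]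
    rfl
  -- the second sort splits into per-kind fibers of the first
  have hmem_o1 : ∀ y ∈ PySem.List.sorted2 nodes
      (fun n => -(pvPriority n ((pvDegA nodes edges).getD (pvUid n) 0)))
      (fun n => pvLabel n) false, y ∈ nodes :=
    fun y hy => (PySem.List.sorted2_perm nodes _ _ false).subset hy
  have hidx_of_mem : ∀ y, y ∈ nodes → ∃ i : Nat,
      PySem.List.index? (pvKinds nodes) (pvKind y) = some i ∧ i < (pvKinds nodes).length ∧
        (∀ (hi : i < (pvKinds nodes).length), (pvKinds nodes)[i] = pvKind y) := by
    intro y hy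
    have hmem : pvKind y ∈ pvKinds nodes :=
      (PySem.Set.mem_ofList _ _).mpr (List.mem_map_of_mem hy)
    cases hix : PySem.List.index? (pvKinds nodes) (pvKind y) with
    | none => exact absurd ((PySem.List.index?_eq_none_iff _ _).mp hix) (by simp [hmem])
    | some i =>
      obtain ⟨hlt, hel, -⟩ := PySem.List.getElem_of_index?_eq_some hix
      exact ⟨i, rfl, hlt, fun _ => hel⟩
  have ho2 : pvO2 nodes edges
      = ((List.range (pvKinds nodes).length).map (fun i => Int.ofNat i)).flatMap
          (fun c => (pvO1 nodes edges).filter (fun y =>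
            decide ((((PySem.List.index? (pvKinds nodes) (pvKind y)).map
              (fun i => Int.ofNat i)).getD 0) = c))) := by
    unfold pvO2
    rw [hgfun]
    refine pv_grp _ _ _ ?_ ?_
    · exact List.pairwise_map.mpr ((List.pairwise_lt_range).imp (fun h => Int.ofNat_lt.mpr h))
    · intro y hy
      obtain ⟨i, hix, hlt, -⟩ := hidx_of_mem y (by
        rw [ho1] at hy; exact hmem_o1 y hy)
      rw [hix]
      exact List.mem_map.mpr ⟨i, List.mem_range.mpr hlt, rfl⟩
  have hflat : ((List.range (pvKinds nodes).length).map (fun i => Int.ofNat i)).flatMap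
        (fun c => (pvO1 nodes edges).filter (fun y =>
          decide ((((PySem.List.index? (pvKinds nodes) (pvKind y)).map
            (fun i => Int.ofNat i)).getD 0) = c)))
      = (pvKinds nodes).flatMap (fun k => (pvO1 nodes edges).filter
          (fun y => decide (pvKind y = k))) := by
    rw [List.flatMap_map]
    refine pv_range_flatMap (pvKinds nodes) _ _ (fun i hi => ?_)
    refine List.filter_congr (fun y hy => ?_)
    have hyn : y ∈ nodes := by
      rw [ho1] at hy; exact hmem_o1 y hy
    obtain ⟨j, hjx, hjlt, hjel⟩ := hidx_of_mem y hyn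
    rw [decide_eq_decide]
    rw [hjx]
    constructor
    · intro h
      have hji : j = i := by simpa using h
      subst hji
      exact (hjel hjlt).symm
    · intro h
      have : PySem.List.index? (pvKinds nodes) (pvKind y) = some i := by
        rw [h]
        exact pv_index?_getElem _ (PySem.Set.nodup_ofList _) i hi
      rw [hjx] at this
      have hji : j = i := by simpa using this
      subst hji
      simp
  have hwalk : pvLabB nodes edges
      = (pvKinds nodes).foldl (fun s k =>
          (((pvO1 nodes edges).filter (fun y => decide (pvKind y = k))).take
            ((((pvLimits nodes).get? k).getD 0).toNat)).foldl
            (fun s n => PySem.Set.add s (pvUid n)) s) PySem.Set.empty := by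
    unfold pvLabB
    rw [show pvO2 nodes edges = (pvKinds nodes).flatMap (fun k => (pvO1 nodes edges).filter
        (fun y => decide (pvKind y = k))) from ho2.trans hflat]
    exact pv_walk_main (pvLimits nodes) (pvKinds nodes) (PySem.Set.nodup_ofList _) _
      (fun k _ n hn => of_decide_eq_true (List.mem_filter.mp hn).2)
      PySem.Set.empty PySem.Dict.empty (fun k _ => by simp)
  have hlab : pvLabA nodes edges = pvLabB nodes edges := by
    rw [hwalk]
    unfold pvLabA pvByKind
    rw [pv_by_kind_items, List.foldl_map]
    refine PySem.List.foldl_congr_mem _ _ _ _ (fun s k hk => ?_)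
    dsimp only
    have hfib : (pvO1 nodes edges).filter (fun y => decide (pvKind y = k))
        = PySem.List.sorted2 (nodes.filter (fun y => decide (pvKind y = k)))
            (fun n => -(pvPriority n ((pvDegA nodes edges).getD (pvUid n) 0)))
            (fun n => pvLabel n) false := by
      rw [ho1, pv_sorted2_eq_foldl, pv_sorted2_eq_foldl]
      exact pv_filter_foldl_insertBy _ (pv_before2_asym _ _) (pv_before2_trans _ _) _ nodes
    have hlim : ((pvLimits nodes).get? k).getD 0
        = pvKindLimit k ((nodes.filter (fun y => decide (pvKind y = k))).length : Int) := by
      unfold pvLimits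
      rw [hcounts, pv_limits_getD nodes k hk]
      exact congrArg (pvKindLimit k) (pv_count_map_kind nodes k)
    have hlimA : (if pvAlways.contains k
          then max (pvCaps.getD k (if pvAlways.contains k
              then PySem.List.len (nodes.filter (fun y => decide (pvKind y = k))) else 5))
            (min (PySem.List.len (nodes.filter (fun y => decide (pvKind y = k)))) 10)
          else pvCaps.getD k (if pvAlways.contains k
              then PySem.List.len (nodes.filter (fun y => decide (pvKind y = k))) else 5))
        = pvKindLimit k (PySem.List.len (nodes.filter (fun y => decide (pvKind y = k)))) := rfl
    rw [hlimA, PySem.List.len_eq]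
    rw [PySem.List.slice_to _ (pv_kindLimit_nonneg k _ (by exact_mod_cast Nat.zero_le _))]
    rw [hfib, hlim]
  rw [hlab, hdeg]

-- ===== VERDICT (by name: the statement is the Claim_ definition above) =====
theorem select_labeled_nodes_py_spec : Claim_equal_select_labeled_nodes_py := by
  intro nodes edges _hdom _hpre
  exact pv_main nodes edges
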